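-- pv_equiv track=rewrite | github.com/bmajoros/EnhancerHMM | delta-test-motif-pairs.py | getTable_old
-- ===== SOURCE A (Python) =====
-- def getTable_old(motif1,motif2,peaks):
--     yesyes=0; yesno=0; noyes=0; nono=0
--     for peak in peaks:
--         if(pairPresent(motif1,motif2,peak)):
--             yesyes+=1
--             continue
--         present=getPresent(peak)
--         motif1present=motif1 in present
--         motif2present=motif2 in present
--         if(motif1==motif2):
--             if(motif1present):
--                 yesno+=1; noyes+=1
--             else: nono+=1
--         else:
--             if(motif1present): yesno+=1
--             if(motif2present): noyes+=1
--             if(not (motif1present or motif2present)): nono+=1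
--     return (yesyes,yesno,noyes,nono)
--
-- def pairPresent(motif1,motif2,peak):
--     for pair in peak:
--         if(pair[0]==motif1 and pair[1]==motif2): return True
--     return False
--
-- def getPresent(peak):
--     present=set()
--     for pair in peak:
--         present.add(pair[0])
--         present.add(pair[1])
--     return present
-- ===== SOURCE B (Python) =====
-- def getTable_old(motif1, motif2, peaks):
--     # Stage 1: map each peak to a state triple (pair-found, motif1-present, motif2-present).
--     states = [
--         (any(a == motif1 and b == motif2 for a, b in peak),
--          any(a == motif1 or b == motif1 for a, b in peak),
--          any(a == motif2 or b == motif2 for a, b in peak))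
--         for peak in peaks
--     ]
--     # Stage 2: tabulate by arithmetic sums; no per-peak branching, and no motif1==motif2
--     # special case: when the motifs are equal the two presence flags coincide, so the
--     # general formulas yield the double increment automatically.
--     yesyes = sum(pf for pf, _, _ in states)
--     yesno = sum(m1 for pf, m1, _ in states if not pf)
--     noyes = sum(m2 for pf, _, m2 in states if not pf)
--     nono = sum(not (pf or m1 or m2) for pf, m1, m2 in states)
--     return (yesyes, yesno, noyes, nono)
-- ===== Notes on version B (the rewrite author's own statement) =====
-- stated objective: alternative
-- what changed: Replaces A's per-peak branch cascade (pair short-circuit with continue, presence set, and an explicit motif1==motif2 double-increment case) by a branch-free two-stage formulation: map every peak to a (pairFound, m1present, m2present) state triple, then compute all four cells as arithmetic sums over the state list; the equal-motif special case disappears because the two presence flags coincide there.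
import Mathlib
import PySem

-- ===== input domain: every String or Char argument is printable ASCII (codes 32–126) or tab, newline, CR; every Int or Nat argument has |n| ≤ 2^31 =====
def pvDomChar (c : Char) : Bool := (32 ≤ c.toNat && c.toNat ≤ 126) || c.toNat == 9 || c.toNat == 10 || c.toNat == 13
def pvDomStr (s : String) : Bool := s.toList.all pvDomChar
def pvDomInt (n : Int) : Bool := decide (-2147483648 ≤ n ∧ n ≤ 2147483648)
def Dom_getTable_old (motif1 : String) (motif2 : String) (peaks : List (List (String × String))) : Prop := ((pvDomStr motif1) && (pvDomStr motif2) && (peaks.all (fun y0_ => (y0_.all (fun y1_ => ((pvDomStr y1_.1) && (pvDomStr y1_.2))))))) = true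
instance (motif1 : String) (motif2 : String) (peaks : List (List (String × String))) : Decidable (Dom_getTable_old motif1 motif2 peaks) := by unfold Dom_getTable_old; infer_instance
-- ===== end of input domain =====

-- B replaces A's per-peak branch cascade (continue on pair match, presence set,
-- explicit motif1==motif2 double-increment case) by a branch-free two-stage
-- formulation: map each peak to a (pairFound, m1present, m2present) state triple,
-- then compute the four cells as arithmetic sums over the state list.

-- ===== PORT A =====
def pairPresent (motif1 motif2 : String) : List (String × String) → Bool
  | [] => false
  | pair :: rest => if pair.1 == motif1 && pair.2 == motif2 then true else pairPresent motif1 motif2 rest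

def getPresent (peak : List (String × String)) : PySem.Set String :=
  peak.foldl (fun s pair => PySem.Set.add (PySem.Set.add s pair.1) pair.2) PySem.Set.empty

def getTable_old (motif1 : String) (motif2 : String) (peaks : List (List (String × String))) : Int × Int × Int × Int :=
  peaks.foldl (fun (acc : Int × Int × Int × Int) peak =>
    let (yesyes, yesno, noyes, nono) := acc
    if pairPresent motif1 motif2 peak then (yesyes + 1, yesno, noyes, nono)
    else
      let present := getPresent peak
      let motif1present := PySem.Set.contains present motif1
      let motif2present := PySem.Set.contains present motif2
      if motif1 == motif2 then
        if motif1present then (yesyes, yesno + 1, noyes + 1, nono)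
        else (yesyes, yesno, noyes, nono + 1)
      else
        let yesno := if motif1present then yesno + 1 else yesno
        let noyes := if motif2present then noyes + 1 else noyes
        let nono := if !(motif1present || motif2present) then nono + 1 else nono
        (yesyes, yesno, noyes, nono)) (0, 0, 0, 0)

-- ===== PORT B =====
def getTable_old_alt (motif1 : String) (motif2 : String) (peaks : List (List (String × String))) : Int × Int × Int × Int :=
  let states := peaks.map (fun peak =>
    (peak.any (fun pr => pr.1 == motif1 && pr.2 == motif2),
     peak.any (fun pr => pr.1 == motif1 || pr.2 == motif1),
     peak.any (fun pr => pr.1 == motif2 || pr.2 == motif2)))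
  let yesyes := (states.map (fun s => if s.1 then (1 : Int) else 0)).sum
  let yesno := ((states.filter (fun s => !s.1)).map (fun s => if s.2.1 then (1 : Int) else 0)).sum
  let noyes := ((states.filter (fun s => !s.1)).map (fun s => if s.2.2 then (1 : Int) else 0)).sum
  let nono := (states.map (fun s => if !(s.1 || s.2.1 || s.2.2) then (1 : Int) else 0)).sum
  (yesyes, yesno, noyes, nono)

-- ===== PRECONDITION & SPEC =====
def Spec_getTable_old (motif1 : String) (motif2 : String) (peaks : List (List (String × String))) (out : Int × Int × Int × Int) : Prop := out = getTable_old_alt motif1 motif2 peaks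
instance (motif1 : String) (motif2 : String) (peaks : List (List (String × String))) (out : Int × Int × Int × Int) : Decidable (Spec_getTable_old motif1 motif2 peaks out) := by unfold Spec_getTable_old; infer_instance

-- ===== CLAIM (what is proved, stated in full; the proofs are below) =====
def Claim_equal_getTable_old : Prop := ∀ (motif1 : String) (motif2 : String) (peaks : List (List (String × String))), Dom_getTable_old motif1 motif2 peaks → Spec_getTable_old motif1 motif2 peaks (getTable_old motif1 motif2 peaks)

-- ===== LEMMAS AND PROOFS =====

-- A's linear-scan helper equals B's `any`.
theorem pairPresent_eq_any (motif1 motif2 : String) (peak : List (String × String)) :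
    pairPresent motif1 motif2 peak = peak.any (fun pr => pr.1 == motif1 && pr.2 == motif2) := by
  induction peak with
  | nil => rfl
  | cons p rest ih =>
    simp only [pairPresent, List.any_cons, ih]
    by_cases h : (p.1 == motif1 && p.2 == motif2) = true <;> simp [h]

theorem contains_add (s : PySem.Set String) (x m : String) :
    PySem.Set.contains (PySem.Set.add s x) m = (PySem.Set.contains s m || m == x) := by
  simp only [PySem.Set.contains, List.contains_eq_mem]
  by_cases h1 : m ∈ (s : List String) <;> by_cases h2 : m = x <;>
    simp [PySem.Set.mem_add, h1, h2]

-- Membership in A's presence set equals B's `any` over the pairs.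
theorem contains_getPresent (peak : List (String × String)) (m : String) :
    PySem.Set.contains (getPresent peak) m
      = peak.any (fun pr => pr.1 == m || pr.2 == m) := by
  unfold getPresent
  have key : ∀ (l : List (String × String)) (s : PySem.Set String),
      PySem.Set.contains (l.foldl (fun s pair => PySem.Set.add (PySem.Set.add s pair.1) pair.2) s) m
        = (PySem.Set.contains s m || l.any (fun pair => pair.1 == m || pair.2 == m)) := by
    intro l
    induction l with
    | nil => intro s; simp
    | cons p rest ih =>
      intro s
      simp only [List.foldl_cons, List.any_cons, ih, contains_add]
      by_cases h1 : m = p.1 <;> by_cases h2 : m = p.2 <;>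
        simp [h1, h2, Bool.or_comm, beq_eq_false_iff_ne.mpr, Ne.symm]
  rw [key peak PySem.Set.empty]
  simp [PySem.Set.empty, PySem.Set.contains]

-- Per-peak state, as B computes it.
def pvSt (motif1 motif2 : String) (peak : List (String × String)) : Bool × Bool × Bool :=
  (peak.any (fun pr => pr.1 == motif1 && pr.2 == motif2),
   peak.any (fun pr => pr.1 == motif1 || pr.2 == motif1),
   peak.any (fun pr => pr.1 == motif2 || pr.2 == motif2))

-- A's step, as per-component additions determined by the state triple.
theorem stepA_eq (motif1 motif2 : String) (peak : List (String × String))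
    (yy yn ny nn : Int) :
    (let (yesyes, yesno, noyes, nono) := ((yy, yn, ny, nn) : Int × Int × Int × Int)
     if pairPresent motif1 motif2 peak then (yesyes + 1, yesno, noyes, nono)
     else
       let present := getPresent peak
       let motif1present := PySem.Set.contains present motif1
       let motif2present := PySem.Set.contains present motif2
       if motif1 == motif2 then
         if motif1present then (yesyes, yesno + 1, noyes + 1, nono)
         else (yesyes, yesno, noyes, nono + 1)
       else
         let yesno := if motif1present then yesno + 1 else yesno
         let noyes := if motif2present then noyes + 1 else noyes
         let nono := if !(motif1present || motif2present) then nono + 1 else nono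
         (yesyes, yesno, noyes, nono))
    = (yy + (if (pvSt motif1 motif2 peak).1 then 1 else 0),
       yn + (if !(pvSt motif1 motif2 peak).1 && (pvSt motif1 motif2 peak).2.1 then 1 else 0),
       ny + (if !(pvSt motif1 motif2 peak).1 && (pvSt motif1 motif2 peak).2.2 then 1 else 0),
       nn + (if !((pvSt motif1 motif2 peak).1 || (pvSt motif1 motif2 peak).2.1 || (pvSt motif1 motif2 peak).2.2) then 1 else 0)) := by
  simp only [pvSt, pairPresent_eq_any, contains_getPresent]
  by_cases hpf : peak.any (fun pr => pr.1 == motif1 && pr.2 == motif2) = true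
  · simp [hpf]
  · by_cases heq : motif1 = motif2
    · subst heq
      by_cases hm : peak.any (fun pr => pr.1 == motif1 || pr.2 == motif1) = true <;>
        simp [hpf, hm]
    · by_cases h1 : peak.any (fun pr => pr.1 == motif1 || pr.2 == motif1) = true <;>
      by_cases h2 : peak.any (fun pr => pr.1 == motif2 || pr.2 == motif2) = true <;>
        simp [hpf, h1, h2, beq_eq_false_iff_ne.mpr heq]

-- The fold of A from any accumulator adds B's four sums componentwise.
theorem fold_eq (motif1 motif2 : String) (peaks : List (List (String × String)))
    (yy yn ny nn : Int) :
    peaks.foldl (fun (acc : Int × Int × Int × Int) peak =>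
      let (yesyes, yesno, noyes, nono) := acc
      if pairPresent motif1 motif2 peak then (yesyes + 1, yesno, noyes, nono)
      else
        let present := getPresent peak
        let motif1present := PySem.Set.contains present motif1
        let motif2present := PySem.Set.contains present motif2
        if motif1 == motif2 then
          if motif1present then (yesyes, yesno + 1, noyes + 1, nono)
          else (yesyes, yesno, noyes, nono + 1)
        else
          let yesno := if motif1present then yesno + 1 else yesno
          let noyes := if motif2present then noyes + 1 else noyes
          let nono := if !(motif1present || motif2present) then nono + 1 else nono
          (yesyes, yesno, noyes, nono)) (yy, yn, ny, nn)
    = (yy + ((peaks.map (pvSt motif1 motif2)).map (fun s => if s.1 then (1 : Int) else 0)).sum,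
       yn + (((peaks.map (pvSt motif1 motif2)).filter (fun s => !s.1)).map (fun s => if s.2.1 then (1 : Int) else 0)).sum,
       ny + (((peaks.map (pvSt motif1 motif2)).filter (fun s => !s.1)).map (fun s => if s.2.2 then (1 : Int) else 0)).sum,
       nn + ((peaks.map (pvSt motif1 motif2)).map (fun s => if !(s.1 || s.2.1 || s.2.2) then (1 : Int) else 0)).sum) := by
  induction peaks generalizing yy yn ny nn with
  | nil => simp
  | cons p rest ih =>
    rw [List.foldl_cons, stepA_eq, ih]
    by_cases hpf : (pvSt motif1 motif2 p).1 = true <;>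
      simp [hpf, add_assoc]

-- ===== VERDICT (by name: the statement is the Claim_ definition above) =====
theorem getTable_old_spec : Claim_equal_getTable_old := by
  intro motif1 motif2 peaks _
  unfold Spec_getTable_old getTable_old getTable_old_alt
  rw [fold_eq]
  simp only [zero_add]
  rfl
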